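-- pv_equiv track=rewrite | github.com/cielavenir/procon | tyama_icpc2017dB.py | solve
-- ===== SOURCE A (Python) =====
-- def solve(s,t):
-- 	if s==t:
-- 		return 'IDENTICAL'
-- 	s=s.split('"')
-- 	t=t.split('"')
-- 	if len(s)==len(t):
-- 		k0=sum(s[i]!=t[i] for i in range(0,len(s),2))
-- 		k1=sum(s[i]!=t[i] for i in range(1,len(s),2))
-- 		if k0==0 and k1==1:
-- 			return 'CLOSE'
-- 	return 'DIFFERENT'
-- ===== SOURCE B (Python) =====
-- def _match(ss, tt, even, seen):
--     if not ss and not tt: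
--         return 'CLOSE' if seen else 'DIFFERENT'
--     if not ss or not tt:
--         return 'DIFFERENT'
--     if ss[0] != tt[0]:
--         if even or seen:
--             return 'DIFFERENT'
--         seen = True
--     return _match(ss[1:], tt[1:], not even, seen)
--
--
-- def solve(s, t):
--     if s == t:
--         return 'IDENTICAL'
--     return _match(s.split('"'), t.split('"'), True, False)
-- ===== Notes on version B (the rewrite author's own statement) =====
-- stated objective: alternative
-- what changed: A tests length equality and then makes two separate strided index scans summing even-position and odd-position mismatches; B walks the two segment lists in lockstep with a recursive early-exit state machine carrying a parity flag and a seen-one-quoted-mismatch flag, returning DIFFERENT as soon as an unquoted mismatch, a second quoted mismatch or a length mismatch appears.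
import Mathlib
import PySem

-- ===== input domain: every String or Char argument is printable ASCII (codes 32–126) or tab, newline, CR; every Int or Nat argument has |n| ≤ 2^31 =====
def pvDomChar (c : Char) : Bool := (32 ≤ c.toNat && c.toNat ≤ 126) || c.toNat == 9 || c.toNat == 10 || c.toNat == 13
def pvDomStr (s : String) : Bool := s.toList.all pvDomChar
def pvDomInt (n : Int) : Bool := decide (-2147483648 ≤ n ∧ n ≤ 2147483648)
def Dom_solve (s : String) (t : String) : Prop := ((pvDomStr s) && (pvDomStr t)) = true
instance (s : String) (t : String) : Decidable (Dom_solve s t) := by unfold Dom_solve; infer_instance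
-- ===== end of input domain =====

-- B replaces A's two strided even/odd mismatch-count scans (plus a length test) by a
-- single recursive early-exit state machine over the two segment lists (objective: alternative).

-- ===== PORT A =====
-- s.split('"') : sep is the nonempty string "\"", so PySem.Str.split? is always `some`;
-- `.getD []` only unwraps that (exact).
def solve (s : String) (t : String) : String :=
  if s = t then "IDENTICAL"
  else
    let ss := (PySem.Str.split? s "\"").getD []
    let tt := (PySem.Str.split? t "\"").getD []
    if ss.length = tt.length then
      let k0 : Int := ((PySem.List.pyRange 0 (ss.length : Int) 2).map
        (fun i => if PySem.List.pyGetD ss i "" ≠ PySem.List.pyGetD tt i "" then (1 : Int) else 0)).sum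
      let k1 : Int := ((PySem.List.pyRange 1 (ss.length : Int) 2).map
        (fun i => if PySem.List.pyGetD ss i "" ≠ PySem.List.pyGetD tt i "" then (1 : Int) else 0)).sum
      if k0 = 0 ∧ k1 = 1 then "CLOSE" else "DIFFERENT"
    else "DIFFERENT"

-- ===== PORT B =====
-- _match(ss, tt, even, seen): recursive early-exit matcher; an unquoted (even-position)
-- mismatch or a second quoted mismatch is DIFFERENT at once, one quoted mismatch is remembered.
def matchSeg : List String → List String → Bool → Bool → String
  | [], [], _, seen => if seen then "CLOSE" else "DIFFERENT"
  | [], _ :: _, _, _ => "DIFFERENT"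
  | _ :: _, [], _, _ => "DIFFERENT"
  | a :: ss, b :: tt, even, seen =>
    if a ≠ b then
      if even || seen then "DIFFERENT" else matchSeg ss tt (!even) true
    else matchSeg ss tt (!even) seen

def solve_alt (s : String) (t : String) : String :=
  if s = t then "IDENTICAL"
  else matchSeg ((PySem.Str.split? s "\"").getD []) ((PySem.Str.split? t "\"").getD []) true false

-- ===== PRECONDITION & SPEC =====
def Spec_solve (s : String) (t : String) (out : String) : Prop := out = solve_alt s t
instance (s : String) (t : String) (out : String) : Decidable (Spec_solve s t out) := by unfold Spec_solve; infer_instance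

-- ===== CLAIM (what is proved, stated in full; the proofs are below) =====
def Claim_equal_solve : Prop := ∀ (s : String) (t : String), Dom_solve s t → Spec_solve s t (solve s t)

-- ===== LEMMAS AND PROOFS =====

-- proof-only counter: mismatches of the two (equal-length) lists at positions whose parity
-- makes them "must-equal" (flag e, alternating) resp. at the other positions
def cntPair : Bool → List String → List String → Nat × Nat
  | _, [], _ => (0, 0)
  | _, _ :: _, [] => (0, 0)
  | e, a :: ss, b :: tt =>
    let p := cntPair (!e) ss tt
    if a ≠ b then (if e then (p.1 + 1, p.2) else (p.1, p.2 + 1)) else p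

-- mismatching lengths always yield DIFFERENT
lemma matchSeg_ne_len (ss : List String) : ∀ (tt : List String) (e seen : Bool),
    ss.length ≠ tt.length → matchSeg ss tt e seen = "DIFFERENT" := by
  induction ss with
  | nil => intro tt e seen h; cases tt with
    | nil => simp at h
    | cons b tt => rfl
  | cons a ss ih =>
    intro tt e seen h
    cases tt with
    | nil => rfl
    | cons b tt =>
      have h' : ss.length ≠ tt.length := by simp at h ⊢; omega
      unfold matchSeg
      by_cases hab : a ≠ b
      · rw [if_pos hab]
        by_cases hes : (e || seen) = true
        · rw [if_pos hes]
        · rw [if_neg hes, ih tt (!e) true h']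
      · rw [if_neg hab, ih tt (!e) seen h']

-- the matcher computes exactly the "no must-equal mismatch, exactly one other mismatch
-- (counting an already-seen one)" test
lemma matchSeg_eq_cnt (ss : List String) : ∀ (tt : List String) (e seen : Bool),
    ss.length = tt.length →
    matchSeg ss tt e seen =
      if (cntPair e ss tt).1 = 0 ∧ (cntPair e ss tt).2 + (cond seen 1 0) = 1
      then "CLOSE" else "DIFFERENT" := by
  induction ss with
  | nil =>
    intro tt e seen h
    cases tt with
    | nil => cases seen <;> simp [matchSeg, cntPair]
    | cons b tt => simp at h
  | cons a ss ih =>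
    intro tt e seen h
    cases tt with
    | nil => simp at h
    | cons b tt =>
      have h' : ss.length = tt.length := by simpa using h
      unfold matchSeg cntPair
      by_cases hab : a ≠ b
      · rw [if_pos hab, if_pos hab]
        cases e with
        | true =>
          simp only [Bool.true_or, if_true]
          rw [if_neg]
          rintro ⟨hc, -⟩
          omega
        | false =>
          cases seen with
          | true =>
            simp only [Bool.or_true, if_true]
            rw [if_neg]
            rintro ⟨-, hc⟩
            simp [cond] at hc
          | false =>
            simp only [Bool.or_false]
            rw [ih tt (!false) true h']
            simp [cond]
      · rw [if_neg hab, if_neg hab, ih tt (!e) seen h']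


-- the counter's two components as indexed parity counts over the common range
lemma cntPair_spec (ss : List String) : ∀ (tt : List String) (e : Bool),
    ss.length = tt.length →
    (cntPair e ss tt).1 = (List.range ss.length).countP
        (fun (k : Nat) => decide (PySem.List.pyGetD ss ((k : Nat) : Int) "" ≠ PySem.List.pyGetD tt ((k : Nat) : Int) "")
          && (decide (k % 2 = 0) == e))
    ∧ (cntPair e ss tt).2 = (List.range ss.length).countP
        (fun (k : Nat) => decide (PySem.List.pyGetD ss ((k : Nat) : Int) "" ≠ PySem.List.pyGetD tt ((k : Nat) : Int) "")
          && (decide (k % 2 = 0) == !e)) := by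
  induction ss with
  | nil => intro tt e h; cases tt with
    | nil => simp [cntPair]
    | cons b tt => simp at h
  | cons a ss ih =>
    intro tt e h
    cases tt with
    | nil => simp at h
    | cons b tt =>
      have h' : ss.length = tt.length := by simpa using h
      have hih := ih tt (!e) h'
      have hshift : ∀ (f : Bool),
          (List.range (ss.length + 1)).countP
            (fun (k : Nat) => decide (PySem.List.pyGetD (a :: ss) ((k : Nat) : Int) "" ≠ PySem.List.pyGetD (b :: tt) ((k : Nat) : Int) "")
              && (decide (k % 2 = 0) == f))
          = (if a ≠ b ∧ f = true then 1 else 0)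
            + (List.range ss.length).countP
              (fun (k : Nat) => decide (PySem.List.pyGetD ss ((k : Nat) : Int) "" ≠ PySem.List.pyGetD tt ((k : Nat) : Int) "")
                && (decide (k % 2 = 0) == !f)) := by
        intro f
        rw [List.range_succ_eq_map, List.countP_cons, List.countP_map]
        have h0 : PySem.List.pyGetD (a :: ss) ((0 : Nat) : Int) "" = a := by
          simp
        have h0' : PySem.List.pyGetD (b :: tt) ((0 : Nat) : Int) "" = b := by
          simp
        have hcong : (List.range ss.length).countP
              ((fun (k : Nat) => decide (PySem.List.pyGetD (a :: ss) ((k : Nat) : Int) "" ≠ PySem.List.pyGetD (b :: tt) ((k : Nat) : Int) "")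
                && (decide (k % 2 = 0) == f)) ∘ Nat.succ)
            = (List.range ss.length).countP
              (fun (k : Nat) => decide (PySem.List.pyGetD ss ((k : Nat) : Int) "" ≠ PySem.List.pyGetD tt ((k : Nat) : Int) "")
                && (decide (k % 2 = 0) == !f)) := by
          apply List.countP_congr
          intro k _
          have hs : PySem.List.pyGetD (a :: ss) ((k + 1 : Nat) : Int) "" = PySem.List.pyGetD ss ((k : Nat) : Int) "" := by
            rw [PySem.List.pyGetD_natCast, PySem.List.pyGetD_natCast]; simp
          have ht : PySem.List.pyGetD (b :: tt) ((k + 1 : Nat) : Int) "" = PySem.List.pyGetD tt ((k : Nat) : Int) "" := by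
            rw [PySem.List.pyGetD_natCast, PySem.List.pyGetD_natCast]; simp
          have hpar : decide ((k + 1) % 2 = 0) = !decide (k % 2 = 0) := by
            rcases Nat.mod_two_eq_zero_or_one k with hk | hk <;> simp [Nat.add_mod, hk]
          simp only [Function.comp_apply, Nat.succ_eq_add_one, hs, ht, hpar]
          cases f <;> simp
        rw [hcong, h0, h0']
        by_cases hab : a ≠ b
        · cases f with
          | false => simp [hab]
          | true => simp [hab]; omega
        · cases f <;> simp [hab]
      constructor
      · show (cntPair e (a :: ss) (b :: tt)).1 = _
        unfold cntPair
        rw [List.length_cons, hshift e]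
        by_cases hab : a ≠ b
        · rw [if_pos hab]
          have h1 := hih.1
          cases e <;> (simp [hab]; simp at h1; omega)
        · rw [if_neg hab]
          have h1 := hih.1
          simp [hab] at h1 ⊢; omega
      · show (cntPair e (a :: ss) (b :: tt)).2 = _
        unfold cntPair
        rw [List.length_cons, hshift (!e)]
        by_cases hab : a ≠ b
        · rw [if_pos hab]
          have h2 := hih.2
          cases e <;> (simp [hab]; simp at h2; omega)
        · rw [if_neg hab]
          have h2 := hih.2
          simp [hab] at h2 ⊢; omega


-- 0/1-valued ite sum is a countP
lemma sum_ite_count {α : Type} (P : α → Prop) [DecidablePred P] (l : List α) :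
    (l.map (fun x => if P x then (1 : Int) else 0)).sum = ((l.countP (fun x => decide (P x))) : Int) := by
  induction l with
  | nil => simp
  | cons x l ih =>
    simp only [List.map_cons, List.sum_cons, List.countP_cons, ih]
    by_cases h : P x
    · simp [h]; ring
    · simp [h]

-- the even strided range, expressed over Nat indices
lemma even_range (N : Nat) :
    PySem.List.pyRange 0 (N : Int) 2 = (List.range ((N + 1) / 2)).map (fun k => ((2 * k : Nat) : Int)) := by
  rw [PySem.List.pyRange_of_pos 0 (N : Int) (by norm_num)]
  have h : (if (0 : Int) < (N : Int) then (((N : Int) - 0 + 2 - 1) / 2).toNat else 0) = (N + 1) / 2 := by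
    split <;> omega
  rw [h]
  apply List.map_congr_left
  intro k _
  push_cast
  ring

-- the odd strided range, expressed over Nat indices
lemma odd_range (N : Nat) :
    PySem.List.pyRange 1 (N : Int) 2 = (List.range (N / 2)).map (fun k => ((2 * k + 1 : Nat) : Int)) := by
  rw [PySem.List.pyRange_of_pos 1 (N : Int) (by norm_num)]
  have h : (if (1 : Int) < (N : Int) then (((N : Int) - 1 + 2 - 1) / 2).toNat else 0) = N / 2 := by
    split <;> omega
  rw [h]
  apply List.map_congr_left
  intro k _
  push_cast
  ring

-- even-position count over range n
lemma countP_even (q : Nat → Bool) (n : Nat) :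
    (List.range ((n + 1) / 2)).countP (fun k => q (2 * k)) =
      (List.range n).countP (fun k => q k && decide (k % 2 = 0)) := by
  induction n with
  | zero => simp
  | succ n ih =>
    rw [List.range_succ, List.countP_append]
    rcases Nat.even_or_odd n with h | h
    · obtain ⟨m, rfl⟩ := h
      have h2 : (m + m + 1 + 1) / 2 = (m + m + 1) / 2 + 1 := by omega
      rw [h2, List.range_succ, List.countP_append, ih]
      have h3 : 2 * ((m + m + 1) / 2) = m + m := by omega
      have h4 : (m + m) % 2 = 0 := by omega
      simp [h3, h4]
    · obtain ⟨m, rfl⟩ := h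
      have h2 : (2 * m + 1 + 1 + 1) / 2 = (2 * m + 1 + 1) / 2 := by omega
      rw [h2, ih]
      have h3 : (2 * m + 1) % 2 = 1 := by omega
      simp [h3]

-- odd-position count over range n
lemma countP_odd (q : Nat → Bool) (n : Nat) :
    (List.range (n / 2)).countP (fun k => q (2 * k + 1)) =
      (List.range n).countP (fun k => q k && decide (k % 2 = 1)) := by
  induction n with
  | zero => simp
  | succ n ih =>
    rw [List.range_succ, List.countP_append]
    rcases Nat.even_or_odd n with h | h
    · obtain ⟨m, rfl⟩ := h
      have h2 : (m + m + 1) / 2 = (m + m) / 2 := by omega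
      rw [h2, ih]
      have h3 : ¬ ((m + m) % 2 = 1) := by omega
      simp [h3]
    · obtain ⟨m, rfl⟩ := h
      have h2 : (2 * m + 1 + 1) / 2 = (2 * m + 1) / 2 + 1 := by omega
      rw [h2, List.range_succ, List.countP_append, ih]
      have h3 : 2 * ((2 * m + 1) / 2) + 1 = 2 * m + 1 := by omega
      have h4 : (2 * m + 1) % 2 = 1 := by omega
      simp [h3, h4]

-- the heart: on equal-length segment lists, A's inner branch equals B's matcher
lemma branch_main (ss tt : List String) (hlen : ss.length = tt.length) :
    (if (((PySem.List.pyRange 0 (ss.length : Int) 2).map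
        (fun i => if PySem.List.pyGetD ss i "" ≠ PySem.List.pyGetD tt i "" then (1 : Int) else 0)).sum = 0 ∧
      ((PySem.List.pyRange 1 (ss.length : Int) 2).map
        (fun i => if PySem.List.pyGetD ss i "" ≠ PySem.List.pyGetD tt i "" then (1 : Int) else 0)).sum = 1)
     then "CLOSE" else "DIFFERENT")
    = matchSeg ss tt true false := by
  rw [matchSeg_eq_cnt ss tt true false hlen]
  apply if_congr _ rfl rfl
  obtain ⟨hc1, hc2⟩ := cntPair_spec ss tt true hlen
  rw [even_range, odd_range, List.map_map, List.map_map]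
  simp only [Function.comp_def]
  rw [sum_ite_count, sum_ite_count]
  rw [countP_even (fun k => decide (PySem.List.pyGetD ss ((k : Nat) : Int) "" ≠ PySem.List.pyGetD tt ((k : Nat) : Int) "")),
    countP_odd (fun k => decide (PySem.List.pyGetD ss ((k : Nat) : Int) "" ≠ PySem.List.pyGetD tt ((k : Nat) : Int) ""))]
  have he : (cntPair true ss tt).1 = (List.range ss.length).countP
      (fun (k : Nat) => decide (PySem.List.pyGetD ss ((k : Nat) : Int) "" ≠ PySem.List.pyGetD tt ((k : Nat) : Int) "") && decide (k % 2 = 0)) := by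
    rw [hc1]; apply List.countP_congr; intro k _; simp
  have ho : (cntPair true ss tt).2 = (List.range ss.length).countP
      (fun (k : Nat) => decide (PySem.List.pyGetD ss ((k : Nat) : Int) "" ≠ PySem.List.pyGetD tt ((k : Nat) : Int) "") && decide (k % 2 = 1)) := by
    rw [hc2]; apply List.countP_congr; intro k _
    rcases Nat.mod_two_eq_zero_or_one k with hk | hk <;> simp [hk]
  rw [he, ho]
  simp only [cond]
  omega

-- ===== VERDICT (by name: the statement is the Claim_ definition above) =====
theorem solve_spec : Claim_equal_solve := by
  intro s t _
  unfold Spec_solve solve solve_alt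
  by_cases hst : s = t
  · rw [if_pos hst, if_pos hst]
  · rw [if_neg hst, if_neg hst]
    set ss := (PySem.Str.split? s "\"").getD [] with hss
    set tt := (PySem.Str.split? t "\"").getD [] with htt
    by_cases hlen : ss.length = tt.length
    · rw [if_pos hlen]
      exact branch_main ss tt hlen
    · rw [if_neg hlen, matchSeg_ne_len ss tt true false hlen]
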